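-- pv_equiv track=rewrite | github.com/lindavik/mf-challenge | backend/givemetheodds/prediction_service.py | _adjust_for_fuelling_needs
-- ===== SOURCE A (Python) =====
-- from typing import Dict, List, Tuple
--
-- def _adjust_for_fuelling_needs(route: List, autonomy: int) -> List:
--     """
--     Adjusts the provided route for fuelling needs, i.e. adds required fuelling stops to the route.
--     :param route: the route
--     :param autonomy: how long the ship can go without refuelling
--     :return: the route adjusted for fuelling needs
--     """
--     new_route: List = []
--     deviation: int = 0
--     last_item = route[-1]
--     fuel_budget: int = autonomy
--
--     for i in range(len(route)):
--         current_leg = route[i]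
--         new_route.append((current_leg[0], current_leg[1] + deviation))
--         if current_leg != last_item:
--             next_leg = route[i + 1]
--             next_flight_distance = next_leg[1] - current_leg[1]
--             if next_flight_distance > fuel_budget:
--                 deviation += 1
--                 fuel_budget = autonomy
--                 new_route.append((current_leg[0], current_leg[1] + deviation))
--             fuel_budget = fuel_budget - next_flight_distance
--
--     return new_route
-- ===== SOURCE B (Python) =====
-- def _adjust_for_fuelling_needs(route, autonomy):
--     """Two-pass version: first compute where refuelling stops go, then render."""
--     last_item = route[-1]
--     fuel_budget = autonomy
--     refuel_after = []
--     for i, current_leg in enumerate(route):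
--         stop = False
--         if current_leg != last_item:
--             next_flight_distance = route[i + 1][1] - current_leg[1]
--             if next_flight_distance > fuel_budget:
--                 stop = True
--                 fuel_budget = autonomy
--             fuel_budget = fuel_budget - next_flight_distance
--         refuel_after.append(stop)
--
--     new_route = []
--     deviation = 0
--     for (name, time), stop in zip(route, refuel_after):
--         new_route.append((name, time + deviation))
--         if stop:
--             deviation += 1
--             new_route.append((name, time + deviation))
--     return new_route
-- ===== Notes on version B (the rewrite author's own statement) =====
-- stated objective: alternative
-- what changed: Replaces A's single fused loop (building the output while tracking fuel and deviation together) by two passes: a first scan that only tracks the fuel budget and records a boolean refuel flag per leg, and a second scan over zip(route, flags) that renders the output with a running deviation.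
import Mathlib
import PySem

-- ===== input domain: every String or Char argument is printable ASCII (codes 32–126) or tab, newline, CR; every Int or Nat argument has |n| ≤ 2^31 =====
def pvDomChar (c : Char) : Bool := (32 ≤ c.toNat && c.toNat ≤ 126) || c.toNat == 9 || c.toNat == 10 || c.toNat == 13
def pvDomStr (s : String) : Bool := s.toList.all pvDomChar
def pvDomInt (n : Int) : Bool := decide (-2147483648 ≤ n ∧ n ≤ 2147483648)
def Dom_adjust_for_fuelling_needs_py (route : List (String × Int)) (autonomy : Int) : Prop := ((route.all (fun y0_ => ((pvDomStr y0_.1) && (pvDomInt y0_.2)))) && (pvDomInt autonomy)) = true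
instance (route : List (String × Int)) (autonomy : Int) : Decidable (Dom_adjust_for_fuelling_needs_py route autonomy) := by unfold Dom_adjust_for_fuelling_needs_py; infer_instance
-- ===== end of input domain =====

-- B replaces A's single fused loop by two passes (flag the refuel points, then render); same cost, different decomposition.
-- Equivalence is about the return value; neither program mutates its arguments.

-- ===== PORT A =====
-- single loop over indices, building the output while tracking deviation and fuel_budget
def adjust_for_fuelling_needs_py (route : List (String × Int)) (autonomy : Int) : List (String × Int) :=
  let last_item := PySem.List.pyGetD route (-1) ("", 0)
  let st := (PySem.List.pyRange 0 (route.length : Int) 1).foldl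
    (fun (st : List (String × Int) × Int × Int) (i : Int) =>
      let new_route := st.1
      let deviation := st.2.1
      let fuel_budget := st.2.2
      let current_leg := PySem.List.pyGetD route i ("", 0)
      let new_route := new_route ++ [(current_leg.1, current_leg.2 + deviation)]
      if current_leg ≠ last_item then
        let next_leg := PySem.List.pyGetD route (i + 1) ("", 0)
        let next_flight_distance := next_leg.2 - current_leg.2
        if next_flight_distance > fuel_budget then
          let deviation := deviation + 1
          let fuel_budget := autonomy
          let new_route := new_route ++ [(current_leg.1, current_leg.2 + deviation)]
          (new_route, deviation, fuel_budget - next_flight_distance)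
        else
          (new_route, deviation, fuel_budget - next_flight_distance)
      else (new_route, deviation, fuel_budget))
    ([], 0, autonomy)
  st.1

-- ===== PORT B =====
-- pass 1: scan tracking only fuel_budget, record a refuel flag per leg; pass 2: render with a running deviation
def adjust_for_fuelling_needs_py_alt (route : List (String × Int)) (autonomy : Int) : List (String × Int) :=
  let last_item := PySem.List.pyGetD route (-1) ("", 0)
  let p1 := (PySem.List.enumerate route 0).foldl
    (fun (st : Int × List Bool) (p : Int × (String × Int)) =>
      let fuel_budget := st.1
      let current_leg := p.2
      if current_leg ≠ last_item then
        let next_flight_distance := (PySem.List.pyGetD route (p.1 + 1) ("", 0)).2 - current_leg.2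
        if next_flight_distance > fuel_budget then
          (autonomy - next_flight_distance, st.2 ++ [true])
        else
          (fuel_budget - next_flight_distance, st.2 ++ [false])
      else (fuel_budget, st.2 ++ [false]))
    (autonomy, [])
  let p2 := (route.zip p1.2).foldl
    (fun (st : List (String × Int) × Int) (q : (String × Int) × Bool) =>
      let out := st.1 ++ [(q.1.1, q.1.2 + st.2)]
      if q.2 then (out ++ [(q.1.1, q.1.2 + st.2 + 1)], st.2 + 1)
      else (out, st.2))
    ([], 0)
  p2.1

-- ===== PRECONDITION & SPEC =====
-- Pre_ excludes only the empty route, on which Python A raises IndexError at route[-1] (B raises there too).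
def Pre_adjust_for_fuelling_needs_py (route : List (String × Int)) (autonomy : Int) : Prop := route ≠ []
instance (route : List (String × Int)) (autonomy : Int) : Decidable (Pre_adjust_for_fuelling_needs_py route autonomy) := by unfold Pre_adjust_for_fuelling_needs_py; infer_instance
def pvWitness_adjust_for_fuelling_needs_py : (List (String × Int)) × Int := ([("a", 0), ("b", 3), ("c", 5)], 2)

def Spec_adjust_for_fuelling_needs_py (route : List (String × Int)) (autonomy : Int) (out : List (String × Int)) : Prop := out = adjust_for_fuelling_needs_py_alt route autonomy
instance (route : List (String × Int)) (autonomy : Int) (out : List (String × Int)) : Decidable (Spec_adjust_for_fuelling_needs_py route autonomy out) := by unfold Spec_adjust_for_fuelling_needs_py; infer_instance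

-- ===== CLAIM (what is proved, stated in full; the proofs are below) =====
def Claim_equal_adjust_for_fuelling_needs_py : Prop := ∀ (route : List (String × Int)) (autonomy : Int), Dom_adjust_for_fuelling_needs_py route autonomy → Pre_adjust_for_fuelling_needs_py route autonomy → Spec_adjust_for_fuelling_needs_py route autonomy (adjust_for_fuelling_needs_py route autonomy)

-- ===== LEMMAS AND PROOFS =====

-- Structural model of A's loop over the suffix of legs still to process.
def pvGoA (last : String × Int) (auto : Int) : List (String × Int) → Int → Int → List (String × Int) → List (String × Int)
  | [], _, _, acc => acc
  | x :: rest, dev, fuel, acc =>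
    let acc := acc ++ [(x.1, x.2 + dev)]
    if x ≠ last then
      let dist := (rest.headD ("", 0)).2 - x.2
      if dist > fuel then
        pvGoA last auto rest (dev + 1) (auto - dist) (acc ++ [(x.1, x.2 + (dev + 1))])
      else
        pvGoA last auto rest dev (fuel - dist) acc
    else pvGoA last auto rest dev fuel acc

-- Structural model of B's first pass (final fuel budget, flags for the suffix).
def pvP1 (last : String × Int) (auto : Int) : List (String × Int) → Int → Int × List Bool
  | [], fuel => (fuel, [])
  | x :: rest, fuel =>
    if x ≠ last then
      let dist := (rest.headD ("", 0)).2 - x.2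
      if dist > fuel then
        let r := pvP1 last auto rest (auto - dist)
        (r.1, true :: r.2)
      else
        let r := pvP1 last auto rest (fuel - dist)
        (r.1, false :: r.2)
    else
      let r := pvP1 last auto rest fuel
      (r.1, false :: r.2)

theorem pvGetD_eq_drop_headD (xs : List (String × Int)) (n : Nat) (d : String × Int) :
    xs.getD n d = (xs.drop n).headD d := by
  induction xs generalizing n with
  | nil => cases n <;> rfl
  | cons x t ih => cases n with
    | zero => rfl
    | succ m => simpa using ih m

-- A's index fold over [k, len) equals pvGoA on the suffix drop k.
theorem pvA_fold (route : List (String × Int)) (last : String × Int) (auto : Int)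
    (suffix : List (String × Int)) :
    ∀ (k : Nat), route.drop k = suffix → ∀ (acc : List (String × Int)) (dev fuel : Int),
    ((PySem.List.pyRange (k : Int) (route.length : Int) 1).foldl
      (fun (st : List (String × Int) × Int × Int) (i : Int) =>
        let new_route := st.1
        let deviation := st.2.1
        let fuel_budget := st.2.2
        let current_leg := PySem.List.pyGetD route i ("", 0)
        let new_route := new_route ++ [(current_leg.1, current_leg.2 + deviation)]
        if current_leg ≠ last then
          let next_leg := PySem.List.pyGetD route (i + 1) ("", 0)
          let next_flight_distance := next_leg.2 - current_leg.2
          if next_flight_distance > fuel_budget then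
            let deviation := deviation + 1
            let fuel_budget := auto
            let new_route := new_route ++ [(current_leg.1, current_leg.2 + deviation)]
            (new_route, deviation, fuel_budget - next_flight_distance)
          else
            (new_route, deviation, fuel_budget - next_flight_distance)
        else (new_route, deviation, fuel_budget))
      (acc, dev, fuel)).1 = pvGoA last auto suffix dev fuel acc := by
  induction suffix with
  | nil =>
    intro k hk acc dev fuel
    have hlen : route.length ≤ k := by
      by_contra h
      have := List.drop_eq_nil_iff.mp hk
      omega
    rw [PySem.List.pyRange_one_eq_nil (by exact_mod_cast hlen)]
    rfl
  | cons x rest ih =>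
    intro k hk acc dev fuel
    have hklt : k < route.length := by
      by_contra h
      rw [List.drop_eq_nil_of_le (by omega)] at hk
      simp at hk
    have hx : PySem.List.pyGetD route (k : Int) ("", 0) = x := by
      rw [PySem.List.pyGetD_natCast, pvGetD_eq_drop_headD, hk]; rfl
    have hnext : PySem.List.pyGetD route (((k + 1 : Nat) : Int)) ("", 0) = rest.headD ("", 0) := by
      rw [PySem.List.pyGetD_natCast, pvGetD_eq_drop_headD, ← List.tail_drop, hk]
      rfl
    have hrest : route.drop (k + 1) = rest := by
      rw [← List.tail_drop, hk]
      rfl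
    have hk1 : (k : Int) + 1 = ((k + 1 : Nat) : Int) := by push_cast; ring
    rw [PySem.List.pyRange_one_cons (by exact_mod_cast hklt)]
    simp only [List.foldl_cons, hx, hk1, hnext]
    by_cases hne : x ≠ last
    · by_cases hgt : (rest.headD ("", 0)).2 - x.2 > fuel
      · simp only [if_pos hne, if_pos hgt]
        rw [ih (k + 1) hrest]
        simp only [pvGoA]
        rw [if_pos hne, if_pos hgt]
      · simp only [if_pos hne, if_neg hgt]
        rw [ih (k + 1) hrest]
        simp only [pvGoA]
        rw [if_pos hne, if_neg hgt]
    · simp only [if_neg hne]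
      rw [ih (k + 1) hrest]
      simp only [pvGoA]
      rw [if_neg hne]

-- B's first-pass fold over enumerate equals pvP1 on the suffix.
theorem pvB_p1 (route : List (String × Int)) (last : String × Int) (auto : Int)
    (suffix : List (String × Int)) :
    ∀ (k : Nat), route.drop k = suffix → ∀ (fuel : Int) (flags : List Bool),
    ((PySem.List.enumerate suffix (k : Int)).foldl
      (fun (st : Int × List Bool) (p : Int × (String × Int)) =>
        let fuel_budget := st.1
        let current_leg := p.2
        if current_leg ≠ last then
          let next_flight_distance := (PySem.List.pyGetD route (p.1 + 1) ("", 0)).2 - current_leg.2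
          if next_flight_distance > fuel_budget then
            (auto - next_flight_distance, st.2 ++ [true])
          else
            (fuel_budget - next_flight_distance, st.2 ++ [false])
        else (fuel_budget, st.2 ++ [false]))
      (fuel, flags)) = ((pvP1 last auto suffix fuel).1, flags ++ (pvP1 last auto suffix fuel).2) := by
  induction suffix with
  | nil =>
    intro k hk fuel flags
    simp [PySem.List.enumerate_nil, pvP1]
  | cons x rest ih =>
    intro k hk fuel flags
    have hnext : PySem.List.pyGetD route (((k + 1 : Nat) : Int)) ("", 0) = rest.headD ("", 0) := by
      rw [PySem.List.pyGetD_natCast, pvGetD_eq_drop_headD, ← List.tail_drop, hk]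
      rfl
    have hrest : route.drop (k + 1) = rest := by
      rw [← List.tail_drop, hk]
      rfl
    have hk1 : (k : Int) + 1 = ((k + 1 : Nat) : Int) := by push_cast; ring
    rw [PySem.List.enumerate_cons]
    simp only [List.foldl_cons, hk1, hnext]
    by_cases hne : x ≠ last
    · by_cases hgt : (rest.headD ("", 0)).2 - x.2 > fuel
      · simp only [if_pos hne, if_pos hgt]
        rw [ih (k + 1) hrest]
        simp only [pvP1]
        rw [if_pos hne, if_pos hgt]
        simp
      · simp only [if_pos hne, if_neg hgt]
        rw [ih (k + 1) hrest]
        simp only [pvP1]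
        rw [if_pos hne, if_neg hgt]
        simp
    · simp only [if_neg hne]
      rw [ih (k + 1) hrest]
      simp only [pvP1]
      rw [if_neg hne]
      simp

-- pvGoA equals B's second pass run on the legs zipped with the pvP1 flags.
theorem pvGoA_eq_render (last : String × Int) (auto : Int) (legs : List (String × Int)) :
    ∀ (dev fuel : Int) (acc : List (String × Int)),
    pvGoA last auto legs dev fuel acc =
    ((legs.zip (pvP1 last auto legs fuel).2).foldl
      (fun (st : List (String × Int) × Int) (q : (String × Int) × Bool) =>
        let out := st.1 ++ [(q.1.1, q.1.2 + st.2)]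
        if q.2 then (out ++ [(q.1.1, q.1.2 + st.2 + 1)], st.2 + 1)
        else (out, st.2))
      (acc, dev)).1 := by
  induction legs with
  | nil => intro dev fuel acc; simp [pvGoA, pvP1]
  | cons x rest ih =>
    intro dev fuel acc
    by_cases hne : x ≠ last
    · by_cases hgt : (rest.headD ("", 0)).2 - x.2 > fuel
      · simp only [pvGoA, pvP1, if_pos hne, if_pos hgt, List.zip_cons_cons, List.foldl_cons]
        rw [ih]
        simp [add_assoc]
      · simp only [pvGoA, pvP1, if_pos hne, if_neg hgt, List.zip_cons_cons, List.foldl_cons]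
        rw [ih]
        rfl
    · simp only [pvGoA, pvP1, if_neg hne, List.zip_cons_cons, List.foldl_cons]
      rw [ih]
      rfl

-- ===== VERDICT (by name: the statement is the Claim_ definition above) =====
theorem adjust_for_fuelling_needs_py_spec : Claim_equal_adjust_for_fuelling_needs_py := by
  intro route autonomy _ _
  show adjust_for_fuelling_needs_py route autonomy = adjust_for_fuelling_needs_py_alt route autonomy
  have hA := pvA_fold route (PySem.List.pyGetD route (-1) ("", 0)) autonomy route 0 rfl [] 0 autonomy
  have hR := pvGoA_eq_render (PySem.List.pyGetD route (-1) ("", 0)) autonomy route 0 autonomy []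
  have hB := congrArg Prod.snd (pvB_p1 route (PySem.List.pyGetD route (-1) ("", 0)) autonomy route 0 rfl autonomy [])
  exact hA.trans (hR.trans (congrArg
    (fun fl => ((route.zip fl).foldl
      (fun (st : List (String × Int) × Int) (q : (String × Int) × Bool) =>
        let out := st.1 ++ [(q.1.1, q.1.2 + st.2)]
        if q.2 then (out ++ [(q.1.1, q.1.2 + st.2 + 1)], st.2 + 1)
        else (out, st.2))
      ([], 0)).1) hB.symm))
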